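-- pv_equiv track=rewrite | github.com/patrickmcsweeney81/EVisionBetCode | src/pipeline_v2/calculate_opportunities.py | get_bookie_columns
-- ===== SOURCE A (Python) =====
-- from typing import Dict, List, Tuple
--
-- META_COLS = {
--     "timestamp",
--     "sport",
--     "event_id",
--     "away_team",
--     "home_team",
--     "commence_time",
--     "market",
--     "point",
--     "selection",
-- }
--
-- ORDERED_BOOKIE_COLS = [
--     "Pinnacle",
--     "Betfair_AU",
--     "Draftkings",
--     "Fanduel",
--     "Betmgm",
--     "Betonline",
--     "Bovada",
--     "Lowvig",
--     "Mybookie",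
--     "Betrivers",
--     "Marathonbet",
--     "Betsson",
--     "Nordicbet",
--     "Sportsbet",
--     "Pointsbet",
--     "Tab",
--     "Tabtouch",
--     "Unibet_AU",
--     "Ladbrokes_AU",
--     "Neds",
--     "Betr",
--     "Boombet",
--     "Williamhill_US",
--     "Fanatics",
--     "Ballybet",
--     "Betparx",
--     "Espnbet",
--     "Fliff",
--     "Hardrockbet",
--     "Rebet",
--     "Williamhill_UK",
--     "Codere",
--     "Tipico",
--     "Leovegas",
--     "Parionssport",
--     "Winamax_FR",
--     "Winamax_DE",
--     "Unibet_FR",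
--     "Unibet_NL",
--     "Unibet_SE",
--     "Betclic",
--     "Betanysports",
--     "Betright",
--     "Betus",
--     "Coolbet",
--     "Dabble_Au",
--     "Everygame",
--     "Gtbets",
--     "Matchbook",
--     "Onexbet",
--     "Playup",
--     "Pmu_Fr",
--     "Sport888",
-- ]
--
-- def get_bookie_columns(rows: List[Dict]) -> List[str]:
--     if not rows:
--         return []
--
--     present: set[str] = set()
--     for row in rows:
--         for key in row.keys():
--             if key not in META_COLS:
--                 present.add(key)
--
--     # Keep the explicit order above, dropping any missing columns, and always ensure Pinnacle first.
--     ordered = [bk for bk in ORDERED_BOOKIE_COLS if bk in present]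
--     if "Pinnacle" not in ordered:
--         ordered = ["Pinnacle"] + ordered
--     return ordered
-- ===== SOURCE B (Python) =====
-- _BOOKIE_ORDER = (
--     "Pinnacle Betfair_AU Draftkings Fanduel Betmgm Betonline Bovada Lowvig "
--     "Mybookie Betrivers Marathonbet Betsson Nordicbet Sportsbet Pointsbet Tab "
--     "Tabtouch Unibet_AU Ladbrokes_AU Neds Betr Boombet Williamhill_US Fanatics "
--     "Ballybet Betparx Espnbet Fliff Hardrockbet Rebet Williamhill_UK Codere "
--     "Tipico Leovegas Parionssport Winamax_FR Winamax_DE Unibet_FR Unibet_NL "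
--     "Unibet_SE Betclic Betanysports Betright Betus Coolbet Dabble_Au Everygame "
--     "Gtbets Matchbook Onexbet Playup Pmu_Fr Sport888"
-- ).split()
--
--
-- def _has_column(rows, bk):
--     return any(bk in row for row in rows)
--
--
-- def get_bookie_columns(rows):
--     if not rows:
--         return []
--     ordered = [bk for bk in _BOOKIE_ORDER if _has_column(rows, bk)]
--     if "Pinnacle" not in ordered:
--         ordered = ["Pinnacle"] + ordered
--     return ordered
-- ===== Notes on version B (the rewrite author's own statement) =====
-- stated objective: simpler
-- what changed: Drops A's present-key set (and the META_COLS filter, which cannot affect bookie names), keeps the column order as one whitespace-split string, and tests each ordered column directly against the rows with a per-column membership scan.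
import Mathlib
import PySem

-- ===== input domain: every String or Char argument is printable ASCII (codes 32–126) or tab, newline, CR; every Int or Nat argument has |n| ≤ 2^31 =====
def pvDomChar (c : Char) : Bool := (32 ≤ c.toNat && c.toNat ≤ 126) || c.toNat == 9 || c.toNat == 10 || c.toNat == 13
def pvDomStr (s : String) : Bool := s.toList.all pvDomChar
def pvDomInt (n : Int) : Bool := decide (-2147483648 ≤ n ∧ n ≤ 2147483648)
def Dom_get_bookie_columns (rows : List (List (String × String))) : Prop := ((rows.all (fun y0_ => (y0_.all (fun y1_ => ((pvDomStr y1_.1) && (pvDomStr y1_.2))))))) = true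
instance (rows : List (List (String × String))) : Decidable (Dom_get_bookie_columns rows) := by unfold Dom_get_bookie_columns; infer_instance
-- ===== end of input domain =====

-- B drops A's present-key set (and the META_COLS filter, which can never match a bookie name),
-- keeps the order as one whitespace-split string, and tests each ordered column directly
-- against the rows with a per-column scan (simpler; same return value).

-- ===== PORT A =====
def META_COLS : PySem.Set String := PySem.Set.ofList
  ["timestamp", "sport", "event_id", "away_team", "home_team", "commence_time",
   "market", "point", "selection"]

def ORDERED_BOOKIE_COLS : List String :=
  ["Pinnacle", "Betfair_AU", "Draftkings", "Fanduel", "Betmgm", "Betonline", "Bovada",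
   "Lowvig", "Mybookie", "Betrivers", "Marathonbet", "Betsson", "Nordicbet", "Sportsbet",
   "Pointsbet", "Tab", "Tabtouch", "Unibet_AU", "Ladbrokes_AU", "Neds", "Betr", "Boombet",
   "Williamhill_US", "Fanatics", "Ballybet", "Betparx", "Espnbet", "Fliff", "Hardrockbet",
   "Rebet", "Williamhill_UK", "Codere", "Tipico", "Leovegas", "Parionssport", "Winamax_FR",
   "Winamax_DE", "Unibet_FR", "Unibet_NL", "Unibet_SE", "Betclic", "Betanysports",
   "Betright", "Betus", "Coolbet", "Dabble_Au", "Everygame", "Gtbets", "Matchbook",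
   "Onexbet", "Playup", "Pmu_Fr", "Sport888"]

def get_bookie_columns (rows : List (List (String × String))) : List String :=
  if rows = [] then []
  else
    let present : PySem.Set String :=
      rows.foldl (fun p row =>
        row.foldl (fun p kv =>
          if PySem.Set.contains META_COLS kv.1 then p else PySem.Set.add p kv.1) p)
        PySem.Set.empty
    let ordered := ORDERED_BOOKIE_COLS.filter (fun bk => PySem.Set.contains present bk)
    if ordered.contains "Pinnacle" then ordered else "Pinnacle" :: ordered

-- ===== PORT B =====
-- Source B keeps the column order as one whitespace-separated string and splits it (Python str.split()).
def BOOKIE_ORDER : List String := PySem.Str.split₀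
  ("Pinnacle Betfair_AU Draftkings Fanduel Betmgm Betonline Bovada Lowvig " ++
   "Mybookie Betrivers Marathonbet Betsson Nordicbet Sportsbet Pointsbet Tab " ++
   "Tabtouch Unibet_AU Ladbrokes_AU Neds Betr Boombet Williamhill_US Fanatics " ++
   "Ballybet Betparx Espnbet Fliff Hardrockbet Rebet Williamhill_UK Codere " ++
   "Tipico Leovegas Parionssport Winamax_FR Winamax_DE Unibet_FR Unibet_NL " ++
   "Unibet_SE Betclic Betanysports Betright Betus Coolbet Dabble_Au Everygame " ++
   "Gtbets Matchbook Onexbet Playup Pmu_Fr Sport888")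

def has_column (rows : List (List (String × String))) (bk : String) : Bool :=
  rows.any (fun row => row.any (fun kv => kv.1 == bk))

def get_bookie_columns_alt (rows : List (List (String × String))) : List String :=
  match rows with
  | [] => []
  | _ =>
    let ordered := BOOKIE_ORDER.filter (has_column rows)
    if ordered.contains "Pinnacle" then ordered else "Pinnacle" :: ordered

-- ===== PRECONDITION & SPEC =====
def Spec_get_bookie_columns (rows : List (List (String × String))) (out : List String) : Prop := out = get_bookie_columns_alt rows
instance (rows : List (List (String × String))) (out : List String) : Decidable (Spec_get_bookie_columns rows out) := by unfold Spec_get_bookie_columns; infer_instance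

-- ===== CLAIM (what is proved, stated in full; the proofs are below) =====
def Claim_equal_get_bookie_columns : Prop := ∀ (rows : List (List (String × String))), Dom_get_bookie_columns rows → Spec_get_bookie_columns rows (get_bookie_columns rows)

-- ===== LEMMAS AND PROOFS =====

-- B's split string yields exactly A's ordered list.
set_option maxRecDepth 40000 in
theorem bookie_order_eq : BOOKIE_ORDER = ORDERED_BOOKIE_COLS := by decide

-- Membership in the set A's inner per-row loop builds.
theorem mem_row_fold (row : List (String × String)) (p : PySem.Set String) (x : String) :
    (x ∈ row.foldl (fun p kv =>
        if PySem.Set.contains META_COLS kv.1 then p else PySem.Set.add p kv.1) p)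
    ↔ x ∈ p ∨ (PySem.Set.contains META_COLS x = false ∧ ∃ kv ∈ row, kv.1 = x) := by
  induction row generalizing p with
  | nil => simp
  | cons hd rest ih =>
    simp only [List.foldl_cons]
    by_cases h : PySem.Set.contains META_COLS hd.1 = true
    · rw [if_pos h, ih]
      constructor
      · rintro (hp | ⟨hm, kv', hkv', he⟩)
        · exact Or.inl hp
        · exact Or.inr ⟨hm, kv', List.mem_cons_of_mem _ hkv', he⟩
      · rintro (hp | ⟨hm, kv', hkv', he⟩)
        · exact Or.inl hp
        · rcases List.mem_cons.mp hkv' with rfl | hmem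
          · rw [he] at h; rw [hm] at h; exact absurd h (by simp)
          · exact Or.inr ⟨hm, kv', hmem, he⟩
    · rw [if_neg h, ih]
      rw [Bool.not_eq_true] at h
      constructor
      · rintro (hp | ⟨hm, kv', hkv', he⟩)
        · rcases (PySem.Set.mem_add p hd.1 x).mp hp with hp | he
          · exact Or.inl hp
          · exact Or.inr ⟨by rw [he]; exact h, hd, List.mem_cons_self, he.symm⟩
        · exact Or.inr ⟨hm, kv', List.mem_cons_of_mem _ hkv', he⟩
      · rintro (hp | ⟨hm, kv', hkv', he⟩)
        · exact Or.inl ((PySem.Set.mem_add p hd.1 x).mpr (Or.inl hp))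
        · rcases List.mem_cons.mp hkv' with he' | hmem
          · exact Or.inl ((PySem.Set.mem_add p hd.1 x).mpr (Or.inr (he' ▸ he.symm)))
          · exact Or.inr ⟨hm, kv', hmem, he⟩

-- Membership in A's full "present" set.
theorem mem_present (rows : List (List (String × String))) (p : PySem.Set String) (x : String) :
    (x ∈ rows.foldl (fun p row =>
        row.foldl (fun p kv =>
          if PySem.Set.contains META_COLS kv.1 then p else PySem.Set.add p kv.1) p) p)
    ↔ x ∈ p ∨ (PySem.Set.contains META_COLS x = false ∧
               ∃ row ∈ rows, ∃ kv ∈ row, kv.1 = x) := by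
  induction rows generalizing p with
  | nil => simp
  | cons row rest ih =>
    simp only [List.foldl_cons]
    rw [ih, mem_row_fold]
    constructor
    · rintro ((hp | ⟨hm, kv, hkv, he⟩) | ⟨hm, r, hr, kv, hkv, he⟩)
      · exact Or.inl hp
      · exact Or.inr ⟨hm, row, List.mem_cons_self, kv, hkv, he⟩
      · exact Or.inr ⟨hm, r, List.mem_cons_of_mem _ hr, kv, hkv, he⟩
    · rintro (hp | ⟨hm, r, hr, kv, hkv, he⟩)
      · exact Or.inl (Or.inl hp)
      · rcases List.mem_cons.mp hr with rfl | hmem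
        · exact Or.inl (Or.inr ⟨hm, kv, hkv, he⟩)
        · exact Or.inr ⟨hm, r, hmem, kv, hkv, he⟩

-- No bookie name is a meta column.
theorem ordered_not_meta : ∀ bk ∈ ORDERED_BOOKIE_COLS, PySem.Set.contains META_COLS bk = false := by
  decide

theorem get_bookie_columns_spec : Claim_equal_get_bookie_columns := by
  unfold Claim_equal_get_bookie_columns Spec_get_bookie_columns
  intro rows _
  unfold get_bookie_columns get_bookie_columns_alt
  cases rows with
  | nil => simp
  | cons r0 rs =>
    rw [if_neg (by simp)]
    simp only [bookie_order_eq]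
    have hfilter :
        ORDERED_BOOKIE_COLS.filter (fun bk => PySem.Set.contains
          ((r0 :: rs).foldl (fun p row =>
            row.foldl (fun p kv =>
              if PySem.Set.contains META_COLS kv.1 then p else PySem.Set.add p kv.1) p)
            PySem.Set.empty) bk)
        = ORDERED_BOOKIE_COLS.filter (has_column (r0 :: rs)) := by
      apply List.filter_congr
      intro bk hbk
      rw [Bool.eq_iff_iff]
      have hpres : (PySem.Set.contains
          ((r0 :: rs).foldl (fun p row =>
            row.foldl (fun p kv =>
              if PySem.Set.contains META_COLS kv.1 then p else PySem.Set.add p kv.1) p)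
            PySem.Set.empty) bk = true)
          ↔ bk ∈ (r0 :: rs).foldl (fun p row =>
              row.foldl (fun p kv =>
                if PySem.Set.contains META_COLS kv.1 then p else PySem.Set.add p kv.1) p)
              PySem.Set.empty := by
        exact List.contains_iff_mem
      rw [hpres, mem_present]
      simp only [PySem.Set.empty, List.not_mem_nil, false_or, has_column,
        List.any_eq_true, beq_iff_eq]
      constructor
      · rintro ⟨_, r, hr, kv, hkv, he⟩; exact ⟨r, hr, kv, hkv, he⟩
      · rintro ⟨r, hr, kv, hkv, he⟩
        exact ⟨he ▸ ordered_not_meta bk hbk, r, hr, kv, hkv, he⟩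
    simp only [hfilter]
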